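-- pv_equiv track=rewrite | github.com/CTStudyGroup/BOJ | _eunjin/5397_키로거.py | solve
-- ===== SOURCE A (Python) =====
-- from collections import deque
--
-- def solve(string):
--     left = deque()
--     right = deque()
--     for s in string:
--         if s == "-":
--             if left:
--                 left.pop()
--         elif s == "<":
--             if left:
--                 right.appendleft(left.pop())
--         elif s == ">":
--             if right:
--                 left.append(right.popleft())
--         else:
--             left.append(s)
--
--     return ''.join(left) + ''.join(right)
-- ===== SOURCE B (Python) =====
-- def solve(string):
--     buf = []
--     cursor = 0
--     for s in string:
--         if s == "-":
--             if cursor > 0: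
--                 del buf[cursor - 1]
--                 cursor -= 1
--         elif s == "<":
--             if cursor > 0:
--                 cursor -= 1
--         elif s == ">":
--             if cursor < len(buf):
--                 cursor += 1
--         else:
--             buf.insert(cursor, s)
--             cursor += 1
--     return ''.join(buf)
-- ===== Notes on version B (the rewrite author's own statement) =====
-- stated objective: idiomatic
-- what changed: Replaces the two deques split at the cursor (characters moved between them on '<'/'>') by one list plus an integer cursor that only moves, with insert/delete at the cursor.
import Mathlib
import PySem

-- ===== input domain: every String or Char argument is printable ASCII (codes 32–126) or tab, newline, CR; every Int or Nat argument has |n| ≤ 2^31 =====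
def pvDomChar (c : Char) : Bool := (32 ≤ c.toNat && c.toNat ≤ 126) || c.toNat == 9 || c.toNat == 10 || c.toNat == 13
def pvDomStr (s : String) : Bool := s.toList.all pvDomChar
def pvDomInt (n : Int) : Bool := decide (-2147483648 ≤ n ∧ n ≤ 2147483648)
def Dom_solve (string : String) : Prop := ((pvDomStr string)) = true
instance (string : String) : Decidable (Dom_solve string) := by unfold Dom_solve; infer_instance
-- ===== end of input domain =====

-- B keeps one buffer list plus an integer cursor instead of A's two deques split at the gap (same return value; idiomatic restructuring, not faster).


-- ===== PORT A =====
-- state: (left, right), left's back is the cursor side (deque pop/append at the end of left, appendleft/popleft at the front of right)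
def solveStep (lr : List Char × List Char) (s : Char) : List Char × List Char :=
  if s = '-' then
    if lr.1 ≠ [] then (lr.1.dropLast, lr.2) else lr
  else if s = '<' then
    match lr.1.getLast? with
    | some c => (lr.1.dropLast, c :: lr.2)
    | none => lr
  else if s = '>' then
    match lr.2 with
    | c :: rest => (lr.1 ++ [c], rest)
    | [] => lr
  else (lr.1 ++ [s], lr.2)

def solve (string : String) : String :=
  let lr := string.toList.foldl solveStep ([], [])
  String.ofList (lr.1 ++ lr.2)

-- ===== PORT B =====
-- state: (buf, cursor)
def solveAltStep (st : List Char × Nat) (s : Char) : List Char × Nat :=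
  if s = '-' then
    if st.2 > 0 then (st.1.eraseIdx (st.2 - 1), st.2 - 1) else st
  else if s = '<' then
    if st.2 > 0 then (st.1, st.2 - 1) else st
  else if s = '>' then
    if st.2 < st.1.length then (st.1, st.2 + 1) else st
  else (st.1.insertIdx st.2 s, st.2 + 1)

def solve_alt (string : String) : String :=
  let st := string.toList.foldl solveAltStep ([], 0)
  String.ofList st.1

-- ===== PRECONDITION & SPEC =====
def Spec_solve (string : String) (out : String) : Prop := out = solve_alt string
instance (string : String) (out : String) : Decidable (Spec_solve string out) := by unfold Spec_solve; infer_instance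

-- ===== CLAIM (what is proved, stated in full; the proofs are below) =====
def Claim_equal_solve : Prop := ∀ (string : String), Dom_solve string → Spec_solve string (solve string)

-- ===== LEMMAS AND PROOFS =====

-- the B state corresponding to an A state
def stRel (lr : List Char × List Char) (st : List Char × Nat) : Prop :=
  st.1 = lr.1 ++ lr.2 ∧ st.2 = lr.1.length

lemma eraseIdx_append_pred (l r : List Char) (h : l ≠ []) :
    (l ++ r).eraseIdx (l.length - 1) = l.dropLast ++ r := by
  induction l with
  | nil => exact absurd rfl h
  | cons a t ih =>
    cases t with
    | nil => simp
    | cons b u =>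
      have := ih (by simp)
      simp only [List.cons_append, List.length_cons, Nat.add_sub_cancel] at *
      simpa [List.eraseIdx, Nat.succ_sub_one] using this

lemma insertIdx_append_length (l r : List Char) (c : Char) :
    (l ++ r).insertIdx l.length c = l ++ c :: r := by
  induction l with
  | nil => simp
  | cons a t ih => simp [List.insertIdx_succ_cons, ih]

lemma stRel_step (lr : List Char × List Char) (st : List Char × Nat) (s : Char)
    (h : stRel lr st) : stRel (solveStep lr s) (solveAltStep st s) := by
  obtain ⟨l, r⟩ := lr
  obtain ⟨b, cur⟩ := st
  obtain ⟨hb, hc⟩ := h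
  simp only at hb hc
  subst hb hc
  unfold solveStep solveAltStep stRel
  by_cases h1 : s = '-'
  · subst h1
    by_cases hl : l = []
    · simp [hl]
    · simp [hl, List.length_pos_iff.mpr hl, eraseIdx_append_pred l r hl]
  · by_cases h2 : s = '<'
    · subst h2
      cases hl : l.getLast? with
      | none => simp [List.getLast?_eq_none_iff.mp hl]
      | some c =>
        have hne : l ≠ [] := by intro h; simp [h] at hl
        have hdl : l.dropLast ++ [c] = l := List.dropLast_append_getLast? c hl
        have hlen : 0 < l.length := List.length_pos_iff.mpr hne
        simp only [if_neg h1, hlen, if_pos]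
        refine ⟨?_, by simp⟩
        calc l ++ r = (l.dropLast ++ [c]) ++ r := by rw [hdl]
          _ = l.dropLast ++ c :: r := by simp
    · by_cases h3 : s = '>'
      · subst h3
        cases r with
        | nil => simp [h1]
        | cons c rest => simp [h1]
      · simp [h1, h2, h3, insertIdx_append_length]

lemma stRel_foldl (cs : List Char) (lr : List Char × List Char) (st : List Char × Nat)
    (h : stRel lr st) :
    stRel (cs.foldl solveStep lr) (cs.foldl solveAltStep st) := by
  induction cs generalizing lr st with
  | nil => exact h
  | cons c cs ih => exact ih _ _ (stRel_step _ _ _ h)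

-- ===== VERDICT (by name: the statement is the Claim_ definition above) =====
theorem solve_spec : Claim_equal_solve := by
  intro string _
  unfold Spec_solve solve solve_alt
  have h := stRel_foldl string.toList ([], []) ([], 0) ⟨rfl, rfl⟩
  simp only []
  rw [h.1]
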